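-- pv_equiv track=rewrite | github.com/diogobontempo88/Project-Restaurant-Orders | restaurant-orders/src/analyze_log.py | never_ordered_dish_per_customer
-- ===== SOURCE A (Python) =====
-- def never_ordered_dish_per_customer(orders, customer):
--     total_meals = []
--     for base in orders:
--         total_meals.append(base["pedido"])
--
--     customer_meals = []
--     for base in orders:
--         if base["cliente"] == customer:
--             customer_meals.append(base["pedido"])
--
--     set_total = set(total_meals)
--     set_customer = set(customer_meals)
--
--     return set_total - set_customer
-- ===== SOURCE B (Python) =====
-- def never_ordered_dish_per_customer(orders, customer):
--     customers_by_dish = {}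
--     for base in orders:
--         customers_by_dish.setdefault(base["pedido"], set()).add(base["cliente"])
--     return {dish for dish, custs in customers_by_dish.items() if customer not in custs}
-- ===== Notes on version B (the rewrite author's own statement) =====
-- stated objective: alternative
-- what changed: Replaces the two separate list-building scans plus set subtraction with one pass that indexes dish -> set of its customers, then a set comprehension over the index keeping dishes whose customer set misses the given customer.
import Mathlib
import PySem

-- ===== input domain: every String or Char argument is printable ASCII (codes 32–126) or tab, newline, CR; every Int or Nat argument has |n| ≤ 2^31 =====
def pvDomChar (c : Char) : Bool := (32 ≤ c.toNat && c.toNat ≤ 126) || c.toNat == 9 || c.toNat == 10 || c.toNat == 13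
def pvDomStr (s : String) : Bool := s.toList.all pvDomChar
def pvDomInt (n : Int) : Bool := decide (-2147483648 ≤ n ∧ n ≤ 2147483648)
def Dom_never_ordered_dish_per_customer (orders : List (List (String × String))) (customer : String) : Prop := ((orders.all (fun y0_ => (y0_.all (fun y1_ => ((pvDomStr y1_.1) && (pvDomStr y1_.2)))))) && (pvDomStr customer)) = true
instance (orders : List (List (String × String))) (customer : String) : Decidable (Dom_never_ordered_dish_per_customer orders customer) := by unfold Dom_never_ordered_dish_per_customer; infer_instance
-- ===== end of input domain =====

-- B replaces A's two list-building scans plus set subtraction by one pass building a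
-- dish -> customer-set index and a set comprehension filtering on membership; alternative structure, not faster.


-- ===== PORT A =====
def never_ordered_dish_per_customer (orders : List (List (String × String))) (customer : String) : List String :=
  let total_meals : List String :=
    orders.foldl (fun acc base => acc ++ [(PySem.Dict.mk base).getD "pedido" ""]) []
  let customer_meals : List String :=
    orders.foldl (fun acc base =>
      if (PySem.Dict.mk base).getD "cliente" "" == customer then
        acc ++ [(PySem.Dict.mk base).getD "pedido" ""]
      else acc) []
  let set_total : PySem.Set String := PySem.Set.ofList total_meals
  let set_customer : PySem.Set String := PySem.Set.ofList customer_meals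
  PySem.Set.diff set_total set_customer

-- ===== PORT B =====
def never_ordered_dish_per_customer_alt (orders : List (List (String × String))) (customer : String) : List String :=
  let customers_by_dish : PySem.Dict String (PySem.Set String) :=
    orders.foldl (fun d base =>
      -- d.setdefault(base["pedido"], set()).add(base["cliente"]) : d[k] = (d.get(k, set())).add(c)
      d.modify ((PySem.Dict.mk base).getD "pedido" "") PySem.Set.empty
        (fun s => PySem.Set.add s ((PySem.Dict.mk base).getD "cliente" ""))) PySem.Dict.empty
  PySem.Set.ofList
    ((customers_by_dish.items.filter (fun p => !(PySem.Set.contains p.2 customer))).map (·.1))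

-- ===== PRECONDITION & SPEC =====
-- Pre_ excludes exactly the orders missing a "pedido" or "cliente" key, where Python A raises KeyError.
def Pre_never_ordered_dish_per_customer (orders : List (List (String × String))) (customer : String) : Prop :=
  ∀ base ∈ orders, (PySem.Dict.mk base).contains "pedido" = true ∧ (PySem.Dict.mk base).contains "cliente" = true
instance (orders : List (List (String × String))) (customer : String) : Decidable (Pre_never_ordered_dish_per_customer orders customer) := by unfold Pre_never_ordered_dish_per_customer; infer_instance
def pvWitness_never_ordered_dish_per_customer : (List (List (String × String))) × String :=
  ([[("pedido", "x"), ("cliente", "ana")], [("pedido", "y"), ("cliente", "bob")]], "ana")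
def Spec_never_ordered_dish_per_customer (orders : List (List (String × String))) (customer : String) (out : List String) : Prop := out = never_ordered_dish_per_customer_alt orders customer
instance (orders : List (List (String × String))) (customer : String) (out : List String) : Decidable (Spec_never_ordered_dish_per_customer orders customer out) := by unfold Spec_never_ordered_dish_per_customer; infer_instance

-- ===== CLAIM (what is proved, stated in full; the proofs are below) =====
def Claim_equal_never_ordered_dish_per_customer : Prop := ∀ (orders : List (List (String × String))) (customer : String), Dom_never_ordered_dish_per_customer orders customer → Pre_never_ordered_dish_per_customer orders customer → Spec_never_ordered_dish_per_customer orders customer (never_ordered_dish_per_customer orders customer)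

-- ===== LEMMAS AND PROOFS =====

theorem foldl_add_app {α : Type} [BEq α] [LawfulBEq α] (t : List α) (s : PySem.Set α)
    (hd : ∀ a ∈ t, a ∉ s) (hn : t.Nodup) : t.foldl PySem.Set.add s = s ++ t := by
  induction t generalizing s with
  | nil => simp
  | cons x r ih =>
    have hx : x ∉ s := hd x (by simp)
    have : PySem.Set.add s x = s ++ [x] := by
      simp [PySem.Set.add, PySem.Set.contains]
      intro hc; exact absurd hc hx
    simp only [List.foldl_cons, this]
    rw [ih (s ++ [x])]
    · simp
    · intro a ha
      simp only [List.mem_append, List.mem_singleton]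
      rintro (h1 | rfl)
      · exact hd a (by simp [ha]) h1
      · exact (List.nodup_cons.mp hn).1 ha
    · exact (List.nodup_cons.mp hn).2

theorem ofList_eq_self_of_nodup {α : Type} [BEq α] [LawfulBEq α] (l : List α) (h : l.Nodup) :
    PySem.Set.ofList l = l := by
  simpa using foldl_add_app l PySem.Set.empty (by simp [PySem.Set.empty]) h

theorem mem_getD_foldl_modify_add {β : Type} (l : List β) (pk ck : β → String) (c k : String)
    (d : PySem.Dict String (PySem.Set String)) :
    c ∈ (l.foldl (fun d b => d.modify (pk b) PySem.Set.empty
          (fun s => PySem.Set.add s (ck b))) d).getD k PySem.Set.empty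
    ↔ c ∈ d.getD k PySem.Set.empty ∨ ∃ b ∈ l, pk b = k ∧ ck b = c := by
  induction l generalizing d with
  | nil => simp
  | cons b t ih =>
    simp only [List.foldl_cons, ih, PySem.Dict.getD_modify]
    by_cases h : k = pk b
    · subst h
      rw [if_pos rfl, PySem.Set.mem_add]
      constructor
      · rintro ((h1 | rfl) | h2)
        · exact .inl h1
        · exact .inr ⟨b, by simp, rfl, rfl⟩
        · obtain ⟨b', hb', h1, h2⟩ := h2; exact .inr ⟨b', by simp [hb'], h1, h2⟩
      · rintro (h1 | ⟨b', hb', h1, h2⟩)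
        · exact .inl (.inl h1)
        · rcases List.mem_cons.mp hb' with rfl | hb'
          · exact .inl (.inr h2.symm)
          · exact .inr ⟨b', hb', h1, h2⟩
    · rw [if_neg h]
      constructor
      · rintro (h1 | ⟨b', hb', h1, h2⟩)
        · exact .inl h1
        · exact .inr ⟨b', by simp [hb'], h1, h2⟩
      · rintro (h1 | ⟨b', hb', h1, h2⟩)
        · exact .inl h1
        · rcases List.mem_cons.mp hb' with rfl | hb'
          · exact absurd h1 (fun hh => h hh.symm)
          · exact .inr ⟨b', hb', h1, h2⟩

-- ===== VERDICT (by name: the statement is the Claim_ definition above) =====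
theorem never_ordered_dish_per_customer_spec : Claim_equal_never_ordered_dish_per_customer := by
  unfold Claim_equal_never_ordered_dish_per_customer
  intro orders customer _ _
  unfold Spec_never_ordered_dish_per_customer
  unfold never_ordered_dish_per_customer never_ordered_dish_per_customer_alt
  simp only [PySem.List.foldl_append_singleton_eq_map, PySem.List.foldl_append_if, List.nil_append]
  set byDish := orders.foldl (fun d base =>
      d.modify ((PySem.Dict.mk base).getD "pedido" "") PySem.Set.empty
        (fun s => PySem.Set.add s ((PySem.Dict.mk base).getD "cliente" ""))) PySem.Dict.empty with hby
  have hkeys : byDish.keys = PySem.Set.ofList (orders.map (fun base => (PySem.Dict.mk base).getD "pedido" "")) := by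
    rw [hby, PySem.Dict.keys_foldl_modify_key orders (fun base => (PySem.Dict.mk base).getD "pedido" "")
      PySem.Set.empty (fun _ base => fun s => PySem.Set.add s ((PySem.Dict.mk base).getD "cliente" "")) PySem.Dict.empty]
    simp only [PySem.Dict.keys_empty, PySem.Set.update_nil_left]
  have hnd : byDish.keys.Nodup := by
    rw [hby]
    exact PySem.Dict.nodup_keys_foldl_modify_key orders _ PySem.Set.empty _ PySem.Dict.empty (by simp)
  rw [PySem.Dict.items_eq_map_keys byDish hnd PySem.Set.empty, List.filter_map, List.map_map]
  simp only [Function.comp_def, List.map_id']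
  rw [ofList_eq_self_of_nodup (byDish.keys.filter _) (hnd.filter _), hkeys, PySem.Set.diff]
  apply List.filter_congr
  intro x hx
  congr 1
  rw [Bool.eq_iff_iff]
  simp only [PySem.Set.contains, List.contains_iff_mem, hby,
    mem_getD_foldl_modify_add orders (fun base => (PySem.Dict.mk base).getD "pedido" "")
      (fun base => (PySem.Dict.mk base).getD "cliente" "") customer x PySem.Dict.empty,
    PySem.Dict.getD_empty, PySem.Set.mem_ofList, List.mem_map, List.mem_filter, beq_iff_eq]
  constructor
  · rintro ⟨b, ⟨hb, h1⟩, h2⟩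
    exact .inr ⟨b, hb, h2, h1⟩
  · rintro (h | ⟨b, hb, h1, h2⟩)
    · simp [PySem.Set.empty] at h
    · exact ⟨b, ⟨hb, h2⟩, h1⟩
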